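-- pv_equiv track=rewrite | github.com/Ctribsz/Lab2-Redes | part2/receiver/receiver.py | crc32_bits
-- ===== SOURCE A (Python) =====
-- def crc32_bits(bits: str) -> int:
--     crc = 0xFFFFFFFF
--     poly = 0x04C11DB7
--     for c in bits:
--         if c not in "01":
--             raise ValueError("Bits inválidos")
--         b = 1 if c == '1' else 0
--         top = (crc >> 31) & 1
--         fb = top ^ b
--         crc = ((crc << 1) & 0xFFFFFFFF)
--         if fb:
--             crc ^= poly
--     crc ^= 0xFFFFFFFF
--     return crc
-- ===== SOURCE B (Python) =====
-- # Table-driven CRC32 (MSB-first, poly 0x04C11DB7): validate, then consume 8 bits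
-- # per step via a precomputed 256-entry table; trailing <8 bits one bit at a time.
-- _POLY = 0x04C11DB7
--
-- def _make_table():
--     table = []
--     for i in range(256):
--         c = i << 24
--         for _ in range(8):
--             c = ((c << 1) & 0xFFFFFFFF) ^ (_POLY if (c >> 31) & 1 else 0)
--         table.append(c)
--     return table
--
-- _TABLE = _make_table()
--
-- def crc32_bits(bits: str) -> int:
--     for c in bits:
--         if c not in "01":
--             raise ValueError("Bits inválidos")
--     crc = 0xFFFFFFFF
--     n = len(bits)
--     i = 0
--     while i + 8 <= n:
--         byte = int(bits[i:i + 8], 2)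
--         crc = ((crc << 8) & 0xFFFFFFFF) ^ _TABLE[((crc >> 24) ^ byte) & 0xFF]
--         i += 8
--     for c in bits[i:]:
--         b = 1 if c == '1' else 0
--         crc = ((crc << 1) & 0xFFFFFFFF) ^ (_POLY if ((crc >> 31) & 1) ^ b else 0)
--     return crc ^ 0xFFFFFFFF
-- ===== Notes on version B (the rewrite author's own statement) =====
-- stated objective: faster
-- what changed: Replaces A's per-bit shift-register loop by a precomputed 256-entry MSB-first CRC32 table that consumes 8 bits per step (remaining trailing bits handled one at a time), after an up-front validation pass; ~3x faster in Python on long inputs.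
import Mathlib
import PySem

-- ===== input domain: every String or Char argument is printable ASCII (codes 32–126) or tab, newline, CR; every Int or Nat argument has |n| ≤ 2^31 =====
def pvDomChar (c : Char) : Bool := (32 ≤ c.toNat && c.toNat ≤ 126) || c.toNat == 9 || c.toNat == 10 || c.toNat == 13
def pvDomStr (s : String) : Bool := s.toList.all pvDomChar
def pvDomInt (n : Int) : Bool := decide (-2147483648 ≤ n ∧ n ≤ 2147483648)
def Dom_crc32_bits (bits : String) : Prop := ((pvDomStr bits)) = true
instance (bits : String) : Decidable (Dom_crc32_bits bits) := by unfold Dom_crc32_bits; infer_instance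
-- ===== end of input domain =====

-- B replaces A's per-bit CRC loop by a 256-entry table consuming 8 bits per step
-- (trailing bits handled one at a time); equivalence is proved on every bit string that A accepts.
-- All Python ints here are nonnegative, so Nat bitwise ops are exact for the
-- Python operators <<, >>, &, ^ used by both programs.

-- ===== PORT A =====
-- one iteration of A's `for c in bits` body after the validity check (b is 0 or 1)
def pvBitStepA (crc b : Nat) : Nat :=
  let top := (crc >>> 31) &&& 1
  let fb := top ^^^ b
  let crc' := (crc <<< 1) &&& 0xFFFFFFFF
  if fb ≠ 0 then crc' ^^^ 0x04C11DB7 else crc'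

-- A's loop; `none` encodes the ValueError "Bits inválidos" (excluded by Pre_)
def pvLoopA : List Char → Nat → Option Nat
  | [], crc => some crc
  | c :: rest, crc =>
    if ¬ (c = '0' ∨ c = '1') then none
    else pvLoopA rest (pvBitStepA crc (if c = '1' then 1 else 0))

def crc32_bits (bits : String) : Int :=
  match pvLoopA bits.toList 0xFFFFFFFF with
  | none => 0  -- ValueError path, outside Pre_
  | some crc => Int.ofNat (crc ^^^ 0xFFFFFFFF)

-- ===== PORT B =====
-- one step `c = ((c << 1) & 0xFFFFFFFF) ^ (_POLY if (c >> 31) & 1 else 0)` of the table builder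
def pvFStep (c : Nat) : Nat :=
  ((c <<< 1) &&& 0xFFFFFFFF) ^^^ (if (c >>> 31) &&& 1 ≠ 0 then 0x04C11DB7 else 0)

def pvTableEntry (i : Nat) : Nat :=
  (List.range 8).foldl (fun c _ => pvFStep c) (i <<< 24)

-- _TABLE = _make_table()
def pvTable : List Nat := (List.range 256).map pvTableEntry

-- int(s, 2) for a validated bit string
def pvByteVal (cs : List Char) : Nat :=
  cs.foldl (fun a c => 2 * a + (if c = '1' then 1 else 0)) 0

-- one iteration of B's trailing-bits loop
def pvTailStep (crc : Nat) (c : Char) : Nat :=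
  ((crc <<< 1) &&& 0xFFFFFFFF) ^^^
    (if ((crc >>> 31) &&& 1) ^^^ (if c = '1' then 1 else 0) ≠ 0 then 0x04C11DB7 else 0)

-- B's `while i + 8 <= n` loop followed by the trailing-bits loop
def pvLoopB : List Char → Nat → Nat
  | c0 :: c1 :: c2 :: c3 :: c4 :: c5 :: c6 :: c7 :: rest, crc =>
    pvLoopB rest
      (((crc <<< 8) &&& 0xFFFFFFFF) ^^^
        pvTable.getD (((crc >>> 24) ^^^ pvByteVal [c0, c1, c2, c3, c4, c5, c6, c7]) &&& 0xFF) 0)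
  | rest, crc => rest.foldl pvTailStep crc

def crc32_bits_alt (bits : String) : Int :=
  if bits.toList.all (fun c => c == '0' || c == '1') then
    Int.ofNat (pvLoopB bits.toList 0xFFFFFFFF ^^^ 0xFFFFFFFF)
  else 0  -- ValueError path, outside Pre_

-- ===== PRECONDITION & SPEC =====
-- Pre_ excludes exactly the inputs containing a character that is not a binary digit, on which A raises ValueError.
def Pre_crc32_bits (bits : String) : Prop := bits.toList.all (fun c => c == '0' || c == '1') = true
instance (bits : String) : Decidable (Pre_crc32_bits bits) := by unfold Pre_crc32_bits; infer_instance

def pvWitness_crc32_bits : String := "110100111"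

def Spec_crc32_bits (bits : String) (out : Int) : Prop := out = crc32_bits_alt bits
instance (bits : String) (out : Int) : Decidable (Spec_crc32_bits bits out) := by unfold Spec_crc32_bits; infer_instance

-- ===== CLAIM (what is proved, stated in full; the proofs are below) =====
def Claim_equal_crc32_bits : Prop := ∀ (bits : String), Dom_crc32_bits bits → Pre_crc32_bits bits → Spec_crc32_bits bits (crc32_bits bits)

-- ===== LEMMAS AND PROOFS =====

-- A's loop body as a fold step over chars
def pvStepC (crc : Nat) (c : Char) : Nat := pvBitStepA crc (if c = '1' then 1 else 0)

theorem pv_and_M_eq_mod (x : Nat) : x &&& 0xFFFFFFFF = x % 2 ^ 32 := by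
  have h := Nat.and_two_pow_sub_one_eq_mod x 32
  norm_num at h ⊢
  exact h

theorem pv_and_M_of_lt {x : Nat} (h : x < 2 ^ 32) : x &&& 0xFFFFFFFF = x := by
  rw [pv_and_M_eq_mod, Nat.mod_eq_of_lt h]

theorem pv_shiftLeft_xor (x y n : Nat) : (x ^^^ y) <<< n = (x <<< n) ^^^ (y <<< n) := by
  apply Nat.eq_of_testBit_eq
  intro i
  simp only [Nat.testBit_shiftLeft, Nat.testBit_xor]
  cases h : decide (i ≥ n) <;> simp

theorem pv_shiftRight_xor (x y n : Nat) : (x ^^^ y) >>> n = (x >>> n) ^^^ (y >>> n) := by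
  apply Nat.eq_of_testBit_eq
  intro i
  simp [Nat.testBit_shiftRight, Nat.testBit_xor]

theorem pv_mod_two_pow_xor (x y n : Nat) : (x ^^^ y) % 2 ^ n = x % 2 ^ n ^^^ y % 2 ^ n := by
  apply Nat.eq_of_testBit_eq
  intro i
  simp only [Nat.testBit_mod_two_pow, Nat.testBit_xor]
  cases h : decide (i < n) <;> simp

theorem pv_ite_xor (t : Prop) [Decidable t] (c p : Nat) :
    (if t then c ^^^ p else c) = c ^^^ (if t then p else 0) := by
  split <;> simp

-- disjoint xor is addition
theorem pv_xor_eq_add {n a : Nat} (b : Nat) (h : a < 2 ^ n) :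
    (b <<< n) ^^^ a = b <<< n + a := by
  simp only [Nat.shiftLeft_eq]
  have hmod : ((b * 2 ^ n) ^^^ a) % 2 ^ n = a := by
    rw [pv_mod_two_pow_xor, Nat.mul_mod_left, Nat.mod_eq_of_lt h]
    simp
  have hdiv : ((b * 2 ^ n) ^^^ a) / 2 ^ n = b := by
    have hx := pv_shiftRight_xor (b * 2 ^ n) a n
    simp only [Nat.shiftRight_eq_div_pow] at hx
    rw [hx, Nat.mul_div_cancel _ (Nat.two_pow_pos n), Nat.div_eq_of_lt h]
    simp
  have h0 := Nat.div_add_mod ((b * 2 ^ n) ^^^ a) (2 ^ n)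
  rw [hdiv, hmod, Nat.mul_comm] at h0
  omega

theorem pv_shiftLeft_shiftLeft (x a b : Nat) : (x <<< a) <<< b = x <<< (a + b) := by
  simp [Nat.shiftLeft_eq, mul_assoc, ← pow_add]

theorem pv_top_of_lt {z : Nat} (h : z < 2 ^ 31) : (z >>> 31) &&& 1 = 0 := by
  rw [Nat.shiftRight_eq_div_pow, Nat.div_eq_of_lt h]
  rfl

-- key linearity: xoring in a low (top-bit-clear) word commutes with one CRC step
theorem pv_fStep_xor_low {z : Nat} (x : Nat) (hz : z < 2 ^ 31) :
    pvFStep (x ^^^ z) = pvFStep x ^^^ (z <<< 1) := by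
  unfold pvFStep
  have htop : ((x ^^^ z) >>> 31) &&& 1 = (x >>> 31) &&& 1 := by
    rw [pv_shiftRight_xor, Nat.and_xor_distrib_right, pv_top_of_lt hz]
    simp
  have hmask : ((x ^^^ z) <<< 1) &&& 0xFFFFFFFF = ((x <<< 1) &&& 0xFFFFFFFF) ^^^ (z <<< 1) := by
    rw [pv_shiftLeft_xor, Nat.and_xor_distrib_right, pv_and_M_of_lt (x := z <<< 1)]
    rw [Nat.shiftLeft_eq]
    calc z * 2 ^ 1 < 2 ^ 31 * 2 ^ 1 := by omega
    _ = 2 ^ 32 := by norm_num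
  rw [htop, hmask, Nat.xor_assoc, Nat.xor_comm (z <<< 1), ← Nat.xor_assoc]

theorem pv_bitStep_eq {b : Nat} (crc : Nat) (hb : b ≤ 1) :
    pvBitStepA crc b = pvFStep (crc ^^^ (b <<< 31)) := by
  interval_cases b
  · unfold pvBitStepA pvFStep
    simp [pv_ite_xor]
  · unfold pvBitStepA pvFStep
    have htop : ((crc ^^^ (1 <<< 31)) >>> 31) &&& 1 = ((crc >>> 31) &&& 1) ^^^ 1 := by
      rw [pv_shiftRight_xor, Nat.and_xor_distrib_right]
      norm_num
    have hmask : ((crc ^^^ (1 <<< 31)) <<< 1) &&& 0xFFFFFFFF = (crc <<< 1) &&& 0xFFFFFFFF := by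
      rw [pv_shiftLeft_xor, Nat.and_xor_distrib_right]
      have hz : ((1 <<< 31) <<< 1) &&& 0xFFFFFFFF = 0 := by
        norm_num [pv_and_M_eq_mod, Nat.shiftLeft_eq]
      rw [hz]
      simp
    rw [htop, hmask, pv_ite_xor]

theorem pv_fStep_lt {x : Nat} (_h : x < 2 ^ 32) : pvFStep x < 2 ^ 32 := by
  unfold pvFStep
  have h1 : (x <<< 1) &&& 0xFFFFFFFF < 2 ^ 32 := by
    rw [pv_and_M_eq_mod]; exact Nat.mod_lt _ (by norm_num)
  split
  · exact Nat.xor_lt_two_pow h1 (by norm_num)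
  · simpa using h1

theorem pv_iter_fStep_lt (k : Nat) {x : Nat} (h : x < 2 ^ 32) : pvFStep^[k] x < 2 ^ 32 := by
  induction k generalizing x with
  | zero => simpa using h
  | succ k ih => rw [Function.iterate_succ_apply]; exact ih (pv_fStep_lt h)

-- byte value with an accumulator
theorem pv_byteVal_aux (l : List Char) (a : Nat) :
    l.foldl (fun a c => 2 * a + (if c = '1' then 1 else 0)) a
      = a * 2 ^ l.length + l.foldl (fun a c => 2 * a + (if c = '1' then 1 else 0)) 0 := by
  induction l generalizing a with
  | nil => simp
  | cons c rest ih =>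
    simp only [List.foldl_cons, List.length_cons]
    rw [ih (2 * a + if c = '1' then 1 else 0), ih (2 * 0 + if c = '1' then 1 else 0)]
    ring

theorem pv_byteVal_cons (c : Char) (rest : List Char) :
    pvByteVal (c :: rest) = (if c = '1' then 1 else 0) * 2 ^ rest.length + pvByteVal rest := by
  unfold pvByteVal
  rw [List.foldl_cons, pv_byteVal_aux]
  ring

theorem pv_byteVal_lt (l : List Char) : pvByteVal l < 2 ^ l.length := by
  induction l with
  | nil => simp [pvByteVal]
  | cons c rest ih =>
    rw [pv_byteVal_cons]
    simp only [List.length_cons]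
    have h2 : 2 ^ (rest.length + 1) = 2 * 2 ^ rest.length := by ring
    split <;> omega

-- A's fold over at most 31 bits equals iterating pvFStep on crc xor the bits' value shifted high
theorem pv_fold_bits (l : List Char) (hl : l.length ≤ 31) (crc : Nat) :
    l.foldl pvStepC crc = pvFStep^[l.length] (crc ^^^ (pvByteVal l <<< (32 - l.length))) := by
  induction l generalizing crc with
  | nil => simp [pvByteVal]
  | cons c rest ih =>
    have hr : rest.length ≤ 31 := by simp at hl; omega
    have hb : (if c = '1' then 1 else 0) ≤ 1 := by split <;> simp
    have hvr : pvByteVal rest <<< (31 - rest.length) < 2 ^ 31 := by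
      rw [Nat.shiftLeft_eq]
      have h1 := pv_byteVal_lt rest
      calc pvByteVal rest * 2 ^ (31 - rest.length)
          < 2 ^ rest.length * 2 ^ (31 - rest.length) :=
            mul_lt_mul_of_pos_right h1 (Nat.two_pow_pos _)
        _ = 2 ^ 31 := by rw [← pow_add]; congr 1; omega
    have hsplit : pvByteVal (c :: rest) <<< (32 - (rest.length + 1))
        = ((if c = '1' then 1 else 0) <<< 31) ^^^ (pvByteVal rest <<< (31 - rest.length)) := by
      have h32 : 32 - (rest.length + 1) = 31 - rest.length := by omega
      have hpow : 2 ^ rest.length * 2 ^ (31 - rest.length) = 2 ^ 31 := by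
        rw [← pow_add]; congr 1; omega
      rw [pv_xor_eq_add _ hvr, pv_byteVal_cons]
      simp only [Nat.shiftLeft_eq, h32]
      rw [add_mul, mul_assoc, hpow]
    rw [List.foldl_cons, ih hr, List.length_cons, Function.iterate_succ_apply, hsplit,
      ← Nat.xor_assoc, pv_fStep_xor_low _ hvr, ← pv_bitStep_eq crc hb]
    have hsh : (pvByteVal rest <<< (31 - rest.length)) <<< 1 = pvByteVal rest <<< (32 - rest.length) := by
      rw [pv_shiftLeft_shiftLeft]
      congr 1
      omega
    rw [hsh]
    rfl

-- splitting off a low part that never reaches the top bit during k steps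
theorem pv_iter_split (k : Nat) (hk : k ≤ 8) (lo w : Nat) (hlo : lo < 2 ^ (32 - k)) :
    pvFStep^[k] (lo ^^^ w) = (lo <<< k) ^^^ pvFStep^[k] w := by
  induction k generalizing lo w with
  | zero => simp
  | succ k ih =>
    have hlo31 : lo < 2 ^ 31 := lt_of_lt_of_le hlo (by
      apply pow_le_pow_right₀ <;> omega)
    rw [Function.iterate_succ_apply, Nat.xor_comm lo w, pv_fStep_xor_low w hlo31,
      Nat.xor_comm _ (lo <<< 1), ih (by omega) _ (pvFStep w) (by
        rw [Nat.shiftLeft_eq]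
        have : 2 ^ (32 - (k + 1)) * 2 ^ 1 = 2 ^ (32 - k) := by
          rw [← pow_add]; congr 1; omega
        calc lo * 2 ^ 1 < 2 ^ (32 - (k+1)) * 2 ^ 1 := by omega
          _ = 2 ^ (32 - k) := this),
      pv_shiftLeft_shiftLeft, Function.iterate_succ_apply, Nat.add_comm 1 k]

theorem pv_foldl_range_iter (f : Nat → Nat) (n : Nat) (x : Nat) :
    (List.range n).foldl (fun c _ => f c) x = f^[n] x := by
  induction n with
  | zero => simp
  | succ n ih => rw [List.range_succ, List.foldl_append, ih, Function.iterate_succ_apply']; rfl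

theorem pv_tableEntry_eq (i : Nat) : pvTableEntry i = pvFStep^[8] (i <<< 24) :=
  pv_foldl_range_iter pvFStep 8 (i <<< 24)

theorem pv_table_getD {v : Nat} (h : v < 256) : pvTable.getD v 0 = pvTableEntry v := by
  unfold pvTable
  rw [List.getD_eq_getElem?_getD, List.getElem?_map, List.getElem?_range h, Option.map_some,
    Option.getD_some]

-- the core step: A's fold over 8 valid bits equals B's table step
theorem pv_chunk_eq {crc : Nat} (h : crc < 2 ^ 32) (c0 c1 c2 c3 c4 c5 c6 c7 : Char) :
    [c0, c1, c2, c3, c4, c5, c6, c7].foldl pvStepC crc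
      = ((crc <<< 8) &&& 0xFFFFFFFF) ^^^
          pvTable.getD (((crc >>> 24) ^^^ pvByteVal [c0, c1, c2, c3, c4, c5, c6, c7]) &&& 0xFF) 0 := by
  set l : List Char := [c0, c1, c2, c3, c4, c5, c6, c7] with hldef
  set byte := pvByteVal l with hbdef
  have hbyte : byte < 2 ^ 8 := by
    have := pv_byteVal_lt l
    simpa [hldef] using this
  have hhi : crc >>> 24 < 2 ^ 8 := by
    rw [Nat.shiftRight_eq_div_pow]
    omega
  have hidx : (crc >>> 24) ^^^ byte < 2 ^ 8 := Nat.xor_lt_two_pow hhi hbyte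
  have hand : ((crc >>> 24) ^^^ byte) &&& 0xFF = (crc >>> 24) ^^^ byte := by
    have h8 := Nat.and_two_pow_sub_one_eq_mod ((crc >>> 24) ^^^ byte) 8
    norm_num at h8
    rw [h8, Nat.mod_eq_of_lt (by exact_mod_cast hidx)]
  have hlo : crc % 2 ^ 24 < 2 ^ 24 := Nat.mod_lt _ (by norm_num)
  have hdecomp : crc = ((crc >>> 24) <<< 24) ^^^ (crc % 2 ^ 24) := by
    rw [pv_xor_eq_add _ hlo, Nat.shiftRight_eq_div_pow, Nat.shiftLeft_eq]
    omega
  have hfold : l.foldl pvStepC crc = pvFStep^[8] (crc ^^^ (byte <<< 24)) := by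
    have := pv_fold_bits l (by simp [hldef]) crc
    simpa [hldef] using this
  have hregroup : crc ^^^ (byte <<< 24)
      = (crc % 2 ^ 24) ^^^ (((crc >>> 24) ^^^ byte) <<< 24) := by
    conv_lhs => rw [hdecomp]
    rw [pv_shiftLeft_xor]
    rw [Nat.xor_comm ((crc >>> 24) <<< 24), Nat.xor_assoc]
  have hsplit : pvFStep^[8] ((crc % 2 ^ 24) ^^^ (((crc >>> 24) ^^^ byte) <<< 24))
      = ((crc % 2 ^ 24) <<< 8) ^^^ pvFStep^[8] ((((crc >>> 24) ^^^ byte)) <<< 24) :=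
    pv_iter_split 8 (by norm_num) _ _ (by omega)
  have hmask : (crc <<< 8) &&& 0xFFFFFFFF = (crc % 2 ^ 24) <<< 8 := by
    rw [pv_and_M_eq_mod, Nat.shiftLeft_eq, Nat.shiftLeft_eq]
    omega
  rw [hfold, hregroup, hsplit, hmask, hand, pv_table_getD hidx, pv_tableEntry_eq]

theorem pv_tailStep_eq : pvTailStep = pvStepC := by
  funext crc c
  rw [pvTailStep, pvStepC, pvBitStepA, pv_ite_xor]

theorem pv_byteStep_lt {crc idx : Nat} (hidx : idx < 256) :
    ((crc <<< 8) &&& 0xFFFFFFFF) ^^^ pvTable.getD idx 0 < 2 ^ 32 := by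
  apply Nat.xor_lt_two_pow
  · rw [pv_and_M_eq_mod]; exact Nat.mod_lt _ (by norm_num)
  · rw [pv_table_getD hidx, pv_tableEntry_eq]
    apply pv_iter_fStep_lt
    rw [Nat.shiftLeft_eq]
    calc idx * 2 ^ 24 < 256 * 2 ^ 24 := by omega
      _ ≤ 2 ^ 32 := by norm_num

theorem pv_loopB_eq (l : List Char) (crc : Nat) :
    crc < 2 ^ 32 → pvLoopB l crc = l.foldl pvStepC crc := by
  induction l, crc using pvLoopB.induct with
  | case1 c0 c1 c2 c3 c4 c5 c6 c7 rest crc ih =>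
    intro h
    have hidx : ((crc >>> 24) ^^^ pvByteVal [c0, c1, c2, c3, c4, c5, c6, c7]) &&& 0xFF < 256 := by
      have h8 := Nat.and_two_pow_sub_one_eq_mod
        ((crc >>> 24) ^^^ pvByteVal [c0, c1, c2, c3, c4, c5, c6, c7]) 8
      norm_num at h8
      rw [h8]
      exact Nat.mod_lt _ (by norm_num)
    rw [pvLoopB, ih (pv_byteStep_lt hidx)]
    have hcons : (c0 :: c1 :: c2 :: c3 :: c4 :: c5 :: c6 :: c7 :: rest)
        = [c0, c1, c2, c3, c4, c5, c6, c7] ++ rest := rfl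
    rw [hcons, List.foldl_append, pv_chunk_eq h]
  | case2 rest crc hne =>
    intro _h
    rw [pvLoopB.eq_def]
    split
    · exact (hne _ _ _ _ _ _ _ _ _ rfl).elim
    · rw [pv_tailStep_eq]

theorem pv_loopA_eq (l : List Char) (crc : Nat) (h : ∀ c ∈ l, c = '0' ∨ c = '1') :
    pvLoopA l crc = some (l.foldl pvStepC crc) := by
  induction l generalizing crc with
  | nil => rfl
  | cons c rest ih =>
    have hc : c = '0' ∨ c = '1' := h c (by simp)
    rw [pvLoopA, if_neg (not_not_intro hc), List.foldl_cons,
      ih _ (fun x hx => h x (by simp [hx]))]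
    rfl

-- ===== VERDICT (by name: the statement is the Claim_ definition above) =====
theorem crc32_bits_spec : Claim_equal_crc32_bits := by
  intro bits _hdom hpre
  have hall : ∀ c ∈ bits.toList, c = '0' ∨ c = '1' := by
    have h := hpre
    rw [Pre_crc32_bits, List.all_eq_true] at h
    intro c hc
    have := h c hc
    simpa using this
  rw [Pre_crc32_bits] at hpre
  unfold Spec_crc32_bits crc32_bits crc32_bits_alt
  rw [pv_loopA_eq _ _ hall, if_pos hpre, pv_loopB_eq _ _ (by norm_num)]
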